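-- pv_equiv track=rewrite | github.com/Scallions/algorithm-ex | oj/leetcode/2275.按位与结果大于零的最长组合.py | largestCombination2
-- ===== SOURCE A (Python) =====
-- from typing import List
--
-- def largestCombination2(candidates: List[int]) -> int:
--     """
--     优化点在于根据最大的数选择长度，以及按位来循环，减少空间使用
--     """
--     ans = 0
--     for i in range(max(candidates).bit_length()):
--         mask = 1 << i
--         res = 0
--         for c in candidates:
--             if c & mask != 0:
--                 res += 1
--         ans = max(ans, res)
--     return ans
-- ===== SOURCE B (Python) =====
-- def largestCombination2(candidates):
--     width = max(candidates).bit_length()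
--
--     def level(xs, w):
--         # recursively peel bit-planes: parity sum of this plane, then halve and recurse
--         if w == 0:
--             return 0
--         here = sum(x & 1 for x in xs)
--         return max(here, level([x >> 1 for x in xs], w - 1))
--
--     return level(candidates, width)
-- ===== Notes on version B (the rewrite author's own statement) =====
-- stated objective: alternative
-- what changed: A indexes bit positions with shifted masks in a nested loop over range(bit_length) and rescans the list per bit; B recursively peels bit-planes: it sums the parities of the whole list, halves every element, recurses on the halved list, and takes the max of the per-plane sums - no masks, no bit indices, no counts table.
import Mathlib
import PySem

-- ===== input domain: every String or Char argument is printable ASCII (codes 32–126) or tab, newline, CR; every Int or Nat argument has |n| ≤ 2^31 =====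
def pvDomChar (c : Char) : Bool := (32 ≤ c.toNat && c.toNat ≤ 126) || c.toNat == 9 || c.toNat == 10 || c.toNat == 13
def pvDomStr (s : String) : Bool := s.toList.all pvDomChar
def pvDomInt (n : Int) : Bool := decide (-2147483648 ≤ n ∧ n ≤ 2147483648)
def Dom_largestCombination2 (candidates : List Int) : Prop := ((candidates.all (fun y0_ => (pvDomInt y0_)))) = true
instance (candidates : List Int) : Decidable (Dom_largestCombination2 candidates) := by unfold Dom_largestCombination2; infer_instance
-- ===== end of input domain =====

-- B replaces A's mask-indexed nested loop by a recursion that peels bit-planes: sum the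
-- parities of the list, halve every element, recurse, take the max; objective: alternative
-- decomposition, not faster.

-- ===== PORT A =====
def largestCombination2 (candidates : List Int) : Int :=
  match PySem.List.max? candidates (fun y => y) with
  | none => 0   -- Python raises ValueError here (max of empty sequence); excluded by Pre_
  | some m =>
    (List.range (PySem.Int.bitLength m)).foldl (fun ans (i : Nat) =>
      let mask : Int := (1 : Int) <<< i
      let res := candidates.foldl (fun res c =>
        if PySem.Int.band c mask ≠ 0 then res + 1 else res) (0 : Int)
      max ans res) 0

-- ===== PORT B =====
-- Source B's recursive `level`: parity sum of the current plane, then halve and recurse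
-- (x >> 1 is Int's >>>, which floors exactly like Python's shift, also on negatives)
def level (xs : List Int) (w : Nat) : Int :=
  match w with
  | 0 => 0
  | Nat.succ w' =>
    let here := xs.foldl (fun a x => a + PySem.Int.band x 1) 0
    max here (level (xs.map (fun x : Int => x >>> (1:Nat))) w')

def largestCombination2_alt (candidates : List Int) : Int :=
  match PySem.List.max? candidates (fun y => y) with
  | none => 0   -- Python raises ValueError here (max of empty sequence); excluded by Pre_
  | some m => level candidates (PySem.Int.bitLength m)

-- ===== PRECONDITION & SPEC =====
-- Pre_ excludes exactly the empty list, on which both Pythons raise ValueError (max of an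
-- empty sequence).
def Pre_largestCombination2 (candidates : List Int) : Prop := candidates ≠ []
instance (candidates : List Int) : Decidable (Pre_largestCombination2 candidates) := by
  unfold Pre_largestCombination2; infer_instance

def pvWitness_largestCombination2 : List Int := [16, 17, 71, 62, 12, 24, 14]

def Spec_largestCombination2 (candidates : List Int) (out : Int) : Prop :=
  out = largestCombination2_alt candidates
instance (candidates : List Int) (out : Int) : Decidable (Spec_largestCombination2 candidates out) := by
  unfold Spec_largestCombination2; infer_instance

-- ===== CLAIM (what is proved, stated in full; the proofs are below) =====
def Claim_equal_largestCombination2 : Prop := ∀ (candidates : List Int), Dom_largestCombination2 candidates → Pre_largestCombination2 candidates → Spec_largestCombination2 candidates (largestCombination2 candidates)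

-- ===== LEMMAS AND PROOFS =====

-- number of candidates with bit j set (two's complement); both results are maxima of these
def cnt (xs : List Int) (j : Nat) : Int :=
  (xs.countP (fun (c : Int) => decide (PySem.Int.band (c >>> j) 1 ≠ 0)) : Int)

lemma shiftRight_zero (c : Int) : c >>> (0:Nat) = c := by
  cases c <;> rfl

lemma shiftRight_comp (c : Int) (k : Nat) : (c >>> (1:Nat)) >>> k = c >>> (k+1) := by
  cases c with
  | ofNat n =>
    show Int.ofNat ((n >>> 1) >>> k) = Int.ofNat (n >>> (k+1))
    congr 1
    rw [Nat.add_comm k 1, Nat.shiftRight_add]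
  | negSucc n =>
    show Int.negSucc ((n >>> 1) >>> k) = Int.negSucc (n >>> (k+1))
    congr 1
    rw [Nat.add_comm k 1, Nat.shiftRight_add]

-- bit i of c (any sign) read through A's mask test equals bit 0 of c >>> i
lemma band_neg_formula (a b : Int) (ha : a < 0) (hb : 0 ≤ b) :
    PySem.Int.band a b = ((b.toNat - (b.toNat &&& (-a - 1).toNat) : Nat) : Int) := by
  unfold PySem.Int.band
  rw [if_neg (by omega), if_pos hb]

lemma nat_bit_iff (n i : Nat) :
    (n &&& 2^i ≠ 0) ↔ ((n >>> i) &&& 1 ≠ 0) := by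
  have h2 : n &&& 2^i = (n.testBit i).toNat * 2^i := Nat.and_two_pow n i
  have h3 : (n >>> i) &&& 1 = (n.testBit i).toNat := by
    rw [Nat.and_one_is_mod, Nat.testBit_eq_decide_div_mod_eq, Nat.shiftRight_eq_div_pow]
    rcases Nat.mod_two_eq_zero_or_one (n / 2^i) with h | h <;> simp [h]
  rw [h2, h3]
  rcases Bool.eq_false_or_eq_true (n.testBit i) with h | h <;> simp [h]

lemma band_two_pow_iff (c : Int) (i : Nat) :
    (PySem.Int.band c ((1:Int) <<< i) ≠ 0) ↔ (PySem.Int.band (c >>> i) 1 ≠ 0) := by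
  have hmask : (1:Int) <<< i = ((2^i : Nat) : Int) := by
    rw [Int.shiftLeft_eq, one_mul]; push_cast; ring
  rw [hmask]
  cases c with
  | ofNat n =>
    have h1 : Int.ofNat n >>> i = ((n >>> i : Nat) : Int) := rfl
    have hA : PySem.Int.band (Int.ofNat n) ((2^i : Nat) : Int) = ((n &&& 2^i : Nat) : Int) :=
      PySem.Int.band_natCast n (2^i)
    have hB : PySem.Int.band (((n >>> i : Nat)) : Int) (1 : Int)
        = (((n >>> i) &&& 1 : Nat) : Int) := PySem.Int.band_natCast (n >>> i) 1
    rw [h1, hA, hB]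
    constructor
    · intro h
      exact_mod_cast (nat_bit_iff n i).mp (by exact_mod_cast h)
    · intro h
      exact_mod_cast (nat_bit_iff n i).mpr (by exact_mod_cast h)
  | negSucc n =>
    have hneg : Int.negSucc n < 0 := Int.negSucc_lt_zero n
    have e2 : (-(Int.negSucc n) - 1) = (n : Int) := by
      simp [Int.negSucc_eq]
    have h1 : Int.negSucc n >>> i = Int.negSucc (n >>> i) := rfl
    have hA : PySem.Int.band (Int.negSucc n) ((2^i : Nat) : Int)
        = ((2^i - (2^i &&& n) : Nat) : Int) := by
      rw [band_neg_formula _ _ hneg (Int.natCast_nonneg _), e2, Int.toNat_natCast,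
        Int.toNat_natCast]
    have e3 : (-(Int.negSucc (n >>> i)) - 1) = ((n >>> i : Nat) : Int) := by
      simp [Int.negSucc_eq]
    have hB : PySem.Int.band (Int.negSucc (n >>> i)) (1 : Int)
        = ((1 - (1 &&& (n >>> i)) : Nat) : Int) := by
      rw [band_neg_formula _ _ (Int.negSucc_lt_zero _) (by omega), e3, Int.toNat_natCast]
      norm_num
    rw [h1, hA, hB]
    have h4 : 2^i &&& n = (n.testBit i).toNat * 2^i := by
      rw [Nat.and_comm]; exact Nat.and_two_pow n i
    have h5 : 1 &&& (n >>> i) = (n.testBit i).toNat := by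
      rw [Nat.and_comm, Nat.and_one_is_mod, Nat.testBit_eq_decide_div_mod_eq,
        Nat.shiftRight_eq_div_pow]
      rcases Nat.mod_two_eq_zero_or_one (n / 2^i) with h | h <;> simp [h]
    rw [h4, h5]
    have hp : (0:Nat) < 2^i := by positivity
    rcases Bool.eq_false_or_eq_true (n.testBit i) with h | h <;> simp [h]

-- ----- A side: the inner scan counts the candidates with bit i set -----

lemma inner_count (xs : List Int) (i : Nat) :
    ∀ res : Int, xs.foldl (fun res c =>
        if PySem.Int.band c ((1:Int) <<< i) ≠ 0 then res + 1 else res) res = res + cnt xs i := by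
  induction xs with
  | nil => intro res; simp [cnt]
  | cons c t ih =>
    intro res
    have hcnt : cnt (c :: t) i = cnt t i
        + if PySem.Int.band (c >>> i) 1 ≠ 0 then 1 else 0 := by
      simp only [cnt, List.countP_cons]
      split <;> rename_i h <;> simp at h <;> simp [h]
    simp only [List.foldl_cons]
    rw [ih, hcnt]
    by_cases h : PySem.Int.band (c >>> i) 1 ≠ 0
    · rw [if_pos ((band_two_pow_iff c i).mpr h), if_pos h]; ring
    · rw [if_neg (fun hh => h ((band_two_pow_iff c i).mp hh)), if_neg h]; ring

lemma A_char (xs : List Int) (m : Int) (hm : PySem.List.max? xs (fun y => y) = some m) :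
    largestCombination2 xs =
      (List.range (PySem.Int.bitLength m)).foldl (fun ans i => max ans (cnt xs i)) 0 := by
  unfold largestCombination2
  rw [hm]
  have hfun : (fun (ans : Int) (i : Nat) => max ans (xs.foldl (fun res c =>
        if PySem.Int.band c ((1:Int) <<< i) ≠ 0 then res + 1 else res) (0:Int)))
      = fun (ans : Int) (i : Nat) => max ans (cnt xs i) := by
    funext ans i
    rw [inner_count xs i 0, zero_add]
  exact congrFun (congrFun (congrArg List.foldl hfun) 0) (List.range (PySem.Int.bitLength m))

-- ----- B side: parity sums and the bit-plane recursion -----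

lemma band_one_cases (x : Int) : PySem.Int.band x 1 = 0 ∨ PySem.Int.band x 1 = 1 := by
  cases x with
  | ofNat n =>
    have h := PySem.Int.band_natCast n 1
    rw [Nat.cast_one, Nat.and_one_is_mod] at h
    rw [show (Int.ofNat n) = ((n : Nat) : Int) from rfl, h]
    rcases Nat.mod_two_eq_zero_or_one n with hm | hm <;> simp [hm]
  | negSucc n =>
    have e3 : (-(Int.negSucc n) - 1) = ((n : Nat) : Int) := by simp [Int.negSucc_eq]
    rw [band_neg_formula _ _ (Int.negSucc_lt_zero n) (by omega), e3, Int.toNat_natCast]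
    rw [show ((1:Int).toNat) = 1 from rfl, Nat.and_comm, Nat.and_one_is_mod]
    rcases Nat.mod_two_eq_zero_or_one n with h | h <;> simp [h]

-- the parity sum of the list is the count of odd elements
lemma parity_sum (xs : List Int) :
    ∀ a : Int, xs.foldl (fun a x => a + PySem.Int.band x 1) a = a + cnt xs 0 := by
  induction xs with
  | nil => intro a; simp [cnt]
  | cons c t ih =>
    intro a
    have hc0 : c >>> (0:Nat) = c := shiftRight_zero c
    have hcnt : cnt (c :: t) 0 = cnt t 0 + if PySem.Int.band c 1 ≠ 0 then 1 else 0 := by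
      simp only [cnt, List.countP_cons, hc0]
      split <;> rename_i h <;> simp at h <;> simp [h]
    simp only [List.foldl_cons]
    rw [ih, hcnt]
    rcases band_one_cases c with h | h
    · rw [h]; simp
    · rw [h]; simp; ring

lemma cnt_map_half (xs : List Int) (j : Nat) :
    cnt (xs.map (fun x : Int => x >>> (1:Nat))) j = cnt xs (j+1) := by
  unfold cnt
  rw [List.countP_map]
  congr 1
  apply List.countP_congr
  intro c _
  simp only [Function.comp]
  rw [shiftRight_comp]

-- pull a max out of a running-max fold
lemma foldl_max_init (g : Nat → Int) (l : List Nat) :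
    ∀ b c : Int, l.foldl (fun a j => max a (g j)) (max b c)
      = max b (l.foldl (fun a j => max a (g j)) c) := by
  induction l with
  | nil => intro b c; rfl
  | cons j t ih =>
    intro b c
    simp only [List.foldl_cons]
    rw [max_assoc, ih]

-- B's recursion computes the same running maximum of the per-bit counts as A's loop
lemma level_eq (w : Nat) : ∀ xs : List Int,
    level xs w = (List.range w).foldl (fun a j => max a (cnt xs j)) 0 := by
  induction w with
  | zero => intro xs; rfl
  | succ w' ih =>
    intro xs
    show max (xs.foldl (fun a x => a + PySem.Int.band x 1) 0)
        (level (xs.map (fun x : Int => x >>> (1:Nat))) w') = _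
    rw [parity_sum xs 0, zero_add, ih]
    have hmap : (fun (a : Int) (j : Nat) => max a (cnt (xs.map (fun x : Int => x >>> (1:Nat))) j))
        = fun (a : Int) (j : Nat) => max a (cnt xs (j+1)) := by
      funext a j
      rw [cnt_map_half]
    rw [hmap, List.range_succ_eq_map]
    simp only [List.foldl_cons, List.foldl_map, Nat.succ_eq_add_one]
    rw [max_comm (0:Int) (cnt xs 0),
      foldl_max_init (fun j => cnt xs (j+1)) (List.range w') (cnt xs 0) 0]

-- ===== VERDICT (by name: the statement is the Claim_ definition above) =====
theorem largestCombination2_spec : Claim_equal_largestCombination2 := by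
  intro candidates _ hne
  unfold Spec_largestCombination2
  obtain ⟨m, hm⟩ : ∃ m, PySem.List.max? candidates (fun y => y) = some m := by
    cases h : PySem.List.max? candidates (fun y => y) with
    | none => exact absurd ((PySem.List.max?_eq_none_iff _ _).mp h) hne
    | some m => exact ⟨m, rfl⟩
  rw [A_char candidates m hm]
  unfold largestCombination2_alt
  rw [hm]
  exact (level_eq (PySem.Int.bitLength m) candidates).symm
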